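-- pv_equiv track=rewrite | github.com/rajamohan1950/CLSplusplus | benchmarking_LoCoMo/run_clspp_benchmark.py | _normalize_adversarial
-- ===== SOURCE A (Python) =====
-- def _normalize_adversarial(prediction: str) -> str:
--     """Robust adversarial detection — normalize 'not mentioned' variants."""
--     p = prediction.lower().strip()
--     NOT_MENTIONED_PATTERNS = [
--         "not mentioned in the conversation",
--         "not mentioned",
--         "no information available",
--         "not discussed",
--         "not specified",
--         "not stated",
--         "no mention",
--         "cannot be determined",
--         "can't be determined",
--         "not available in",
--         "no relevant information",
--         "i don't know",
--         "there is no mention",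
--         "there's no mention",
--         "doesn't mention",
--         "does not mention",
--         "wasn't mentioned",
--         "was not mentioned",
--         "isn't mentioned",
--         "is not mentioned",
--         "no data available",
--         "cannot find",
--         "unable to find",
--         "not found in",
--     ]
--     for pattern in NOT_MENTIONED_PATTERNS:
--         if pattern in p:
--             return "Not mentioned in the conversation"
--     return prediction
-- ===== SOURCE B (Python) =====
-- _CANON = "Not mentioned in the conversation"
--
-- _PATTERNS = [
--     "not mentioned in the conversation",
--     "not mentioned",
--     "no information available",
--     "not discussed",
--     "not specified",
--     "not stated",
--     "no mention",
--     "cannot be determined",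
--     "can't be determined",
--     "not available in",
--     "no relevant information",
--     "i don't know",
--     "there is no mention",
--     "there's no mention",
--     "doesn't mention",
--     "does not mention",
--     "wasn't mentioned",
--     "was not mentioned",
--     "isn't mentioned",
--     "is not mentioned",
--     "no data available",
--     "cannot find",
--     "unable to find",
--     "not found in",
-- ]
--
-- # dispatch table: patterns grouped by their first character, built once
-- _BY_FIRST = {}
-- for _pat in _PATTERNS:
--     _BY_FIRST.setdefault(_pat[0], []).append(_pat)
--
--
-- def _normalize_adversarial(prediction: str) -> str:
--     """One left-to-right pass over the normalized text: at each position,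
--     only patterns that start with that character are tried."""
--     p = prediction.lower().strip()
--     for i in range(len(p)):
--         for pat in _BY_FIRST.get(p[i], ()):
--             if p.startswith(pat, i):
--                 return _CANON
--     return prediction
-- ===== Notes on version B (the rewrite author's own statement) =====
-- stated objective: alternative
-- what changed: Replaces 24 independent whole-text substring scans with a single left-to-right pass over the lowered/stripped text, dispatching at each position through a precomputed first-character table of the patterns (the 24 pattern strings themselves are shared data).
import Mathlib
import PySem

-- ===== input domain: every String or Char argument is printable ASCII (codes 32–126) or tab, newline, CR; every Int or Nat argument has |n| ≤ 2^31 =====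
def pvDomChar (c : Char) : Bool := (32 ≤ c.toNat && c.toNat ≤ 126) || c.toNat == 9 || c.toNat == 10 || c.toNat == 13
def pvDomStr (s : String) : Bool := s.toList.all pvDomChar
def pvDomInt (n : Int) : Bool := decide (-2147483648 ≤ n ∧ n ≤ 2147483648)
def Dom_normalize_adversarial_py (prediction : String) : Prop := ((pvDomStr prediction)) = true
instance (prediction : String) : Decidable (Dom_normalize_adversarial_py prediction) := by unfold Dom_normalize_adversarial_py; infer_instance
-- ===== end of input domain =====

-- B replaces A's 24 independent substring scans by one left-to-right pass over the
-- normalized text with a first-character dispatch table (alternative algorithm, same results).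


def pvCanon : String := "Not mentioned in the conversation"

def pvPatterns : List String :=
  [ "not mentioned in the conversation", "not mentioned", "no information available",
    "not discussed", "not specified", "not stated", "no mention",
    "cannot be determined", "can't be determined", "not available in",
    "no relevant information", "i don't know", "there is no mention",
    "there's no mention", "doesn't mention", "does not mention",
    "wasn't mentioned", "was not mentioned", "isn't mentioned", "is not mentioned",
    "no data available", "cannot find", "unable to find", "not found in" ]

-- ===== PORT A =====
-- for pattern in NOT_MENTIONED_PATTERNS: if pattern in p: return canon
def pvGoA (prediction p : String) : List String → String
  | [] => prediction
  | pat :: rest => if PySem.Str.isIn pat p then pvCanon else pvGoA prediction p rest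

def normalize_adversarial_py (prediction : String) : String :=
  pvGoA prediction (PySem.Str.strip (PySem.Str.lower prediction)) pvPatterns

-- ===== PORT B =====
-- pat[0] of a nonempty pattern literal
def pvFirst (pat : String) : Char := pat.toList.headD ' '

-- _BY_FIRST: dict built once by setdefault(pat[0], []).append(pat)
def pvByFirst : PySem.Dict Char (List String) :=
  pvPatterns.foldl (fun d pat => d.modify (pvFirst pat) [] (fun l => l ++ [pat])) PySem.Dict.empty

-- for i in range(len(p)): for pat in _BY_FIRST.get(p[i], ()): if p.startswith(pat, i): return canon
-- (the index loop is the structural recursion over suffixes of p; p.startswith(pat, i) is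
--  pat.toList.isPrefixOf (suffix at i))
def pvGoB (prediction : String) : List Char → String
  | [] => prediction
  | c :: rest =>
      if (pvByFirst.getD c []).any (fun pat => pat.toList.isPrefixOf (c :: rest)) then pvCanon
      else pvGoB prediction rest

def normalize_adversarial_py_alt (prediction : String) : String :=
  pvGoB prediction (PySem.Str.strip (PySem.Str.lower prediction)).toList

-- ===== PRECONDITION & SPEC =====
def Spec_normalize_adversarial_py (prediction : String) (out : String) : Prop := out = normalize_adversarial_py_alt prediction
instance (prediction : String) (out : String) : Decidable (Spec_normalize_adversarial_py prediction out) := by unfold Spec_normalize_adversarial_py; infer_instance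

-- ===== CLAIM (what is proved, stated in full; the proofs are below) =====
def Claim_equal_normalize_adversarial_py : Prop := ∀ (prediction : String), Dom_normalize_adversarial_py prediction → Spec_normalize_adversarial_py prediction (normalize_adversarial_py prediction)

-- ===== LEMMAS AND PROOFS =====

lemma pvGoA_eq (prediction p : String) (pats : List String) :
    pvGoA prediction p pats =
      if ∃ pat ∈ pats, pat.toList <:+: p.toList then pvCanon else prediction := by
  induction pats with
  | nil => simp [pvGoA]
  | cons pat rest ih =>
      show (if PySem.Str.isIn pat p then pvCanon else pvGoA prediction p rest) = _
      rw [ih]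
      by_cases h : PySem.Str.isIn pat p = true
      · have hx : ∃ q ∈ pat :: rest, q.toList <:+: p.toList :=
          ⟨pat, List.mem_cons_self, (PySem.Str.isIn_iff_infix pat p).mp h⟩
        rw [if_pos h, if_pos hx]
      · have hiff : (∃ q ∈ pat :: rest, q.toList <:+: p.toList) ↔
            (∃ q ∈ rest, q.toList <:+: p.toList) := by
          simp only [List.mem_cons]
          constructor
          · rintro ⟨q, hq | hq, hinf⟩
            · exact absurd ((PySem.Str.isIn_iff_infix pat p).mpr (hq ▸ hinf)) h
            · exact ⟨q, hq, hinf⟩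
          · rintro ⟨q, hq, hinf⟩; exact ⟨q, Or.inr hq, hinf⟩
        rw [if_neg h]
        exact (if_congr hiff rfl rfl).symm

def pvFirstChars : List Char := ['n', 'c', 'i', 't', 'd', 'w', 'u']

set_option maxRecDepth 8192 in
lemma pvKeys_byFirst : pvByFirst.keys = pvFirstChars := by decide

set_option maxRecDepth 8192 in
lemma pvAllFirst : ∀ q ∈ pvPatterns, pvFirst q ∈ pvFirstChars := by decide

-- the dispatch table holds exactly the patterns beginning with the given character
set_option maxRecDepth 8192 in
lemma pvByFirst_getD (c : Char) :
    pvByFirst.getD c [] = pvPatterns.filter (fun q => pvFirst q == c) := by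
  by_cases h : c ∈ pvFirstChars
  · simp only [pvFirstChars, List.mem_cons, List.not_mem_nil, or_false] at h
    rcases h with h | h | h | h | h | h | h <;> subst h <;> decide
  · have hnc : pvByFirst.contains c = false := by
      rw [Bool.eq_false_iff]
      intro hc
      exact h (pvKeys_byFirst ▸ (PySem.Dict.contains_iff_mem_keys pvByFirst c).mp hc)
    rw [PySem.Dict.getD_of_not_contains _ _ hnc]
    symm
    rw [List.filter_eq_nil_iff]
    intro q hq hbeq
    exact h ((beq_iff_eq.mp hbeq) ▸ pvAllFirst q hq)

lemma pvPatterns_ne_nil : ∀ pat ∈ pvPatterns, pat.toList ≠ [] := by decide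

lemma pvFirst_of_prefix (pat : String) (c : Char) (rest : List Char)
    (hne : pat.toList ≠ []) (h : pat.toList <+: c :: rest) : pvFirst pat = c := by
  unfold pvFirst
  cases hl : pat.toList with
  | nil => exact absurd hl hne
  | cons d ds =>
      rw [hl] at h
      obtain ⟨t, ht⟩ := h
      simp at ht
      simp [ht.1]

lemma pvGoB_eq (prediction : String) (s : List Char) :
    pvGoB prediction s =
      if ∃ pat ∈ pvPatterns, pat.toList <:+: s then pvCanon else prediction := by
  induction s with
  | nil =>
      have hno : ¬∃ pat ∈ pvPatterns, pat.toList <:+: ([] : List Char) := by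
        rintro ⟨pat, hm, hinf⟩
        exact pvPatterns_ne_nil pat hm (List.infix_nil.mp hinf)
      show prediction = _
      rw [if_neg hno]
  | cons c rest ih =>
      have hcond :
          ((pvByFirst.getD c []).any (fun pat => pat.toList.isPrefixOf (c :: rest)) = true) ↔
          (∃ pat ∈ pvPatterns, pat.toList <+: c :: rest) := by
        rw [pvByFirst_getD]
        simp only [List.any_eq_true, List.mem_filter, beq_iff_eq, List.isPrefixOf_iff_prefix]
        constructor
        · rintro ⟨pat, ⟨hm, _⟩, hp⟩; exact ⟨pat, hm, hp⟩
        · rintro ⟨pat, hm, hp⟩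
          exact ⟨pat, ⟨hm, pvFirst_of_prefix pat c rest (pvPatterns_ne_nil pat hm) hp⟩, hp⟩
      have hsplit :
          (∃ pat ∈ pvPatterns, pat.toList <:+: c :: rest) ↔
          ((∃ pat ∈ pvPatterns, pat.toList <+: c :: rest) ∨
           (∃ pat ∈ pvPatterns, pat.toList <:+: rest)) := by
        simp only [List.infix_cons_iff]
        constructor
        · rintro ⟨pat, hm, h | h⟩
          · exact Or.inl ⟨pat, hm, h⟩
          · exact Or.inr ⟨pat, hm, h⟩
        · rintro (⟨pat, hm, h⟩ | ⟨pat, hm, h⟩)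
          · exact ⟨pat, hm, Or.inl h⟩
          · exact ⟨pat, hm, Or.inr h⟩
      simp only [pvGoB, ih]
      by_cases h1 : (pvByFirst.getD c []).any (fun pat => pat.toList.isPrefixOf (c :: rest)) = true
      · have hx : ∃ pat ∈ pvPatterns, pat.toList <:+: c :: rest :=
          hsplit.mpr (Or.inl (hcond.mp h1))
        simp [h1, hx]
      · by_cases h2 : ∃ pat ∈ pvPatterns, pat.toList <:+: rest
        · have hx : ∃ pat ∈ pvPatterns, pat.toList <:+: c :: rest := hsplit.mpr (Or.inr h2)
          simp [h1, h2, hx]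
        · have hx : ¬∃ pat ∈ pvPatterns, pat.toList <:+: c :: rest := by
            intro hc
            rcases hsplit.mp hc with h | h
            · exact h1 (hcond.mpr h)
            · exact h2 h
          simp [h1, h2, hx]

-- ===== VERDICT (by name: the statement is the Claim_ definition above) =====
theorem normalize_adversarial_py_spec : Claim_equal_normalize_adversarial_py := by
  intro prediction _
  unfold Spec_normalize_adversarial_py normalize_adversarial_py normalize_adversarial_py_alt
  rw [pvGoA_eq, pvGoB_eq]
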